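-- pv_equiv track=rewrite | github.com/SuyashEkhande/Clinical-Trial-Gov-MCP | tools/enrollment.py | _categorize_enrollments
-- ===== SOURCE A (Python) =====
-- def _categorize_enrollments(enrollments: list[int]) -> dict[str, int]:
--     """Categorize trials by enrollment size."""
--     categories = {
--         "small (<50)": 0,
--         "medium (50-200)": 0,
--         "large (200-500)": 0,
--         "very_large (>500)": 0,
--     }
--
--     for e in enrollments:
--         if e < 50:
--             categories["small (<50)"] += 1
--         elif e < 200:
--             categories["medium (50-200)"] += 1
--         elif e < 500:
--             categories["large (200-500)"] += 1
--         else: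
--             categories["very_large (>500)"] += 1
--
--     return categories
-- ===== SOURCE B (Python) =====
-- _LABELS = ["small (<50)", "medium (50-200)", "large (200-500)", "very_large (>500)"]
--
-- def _categorize_enrollments(enrollments: list[int]) -> dict[str, int]:
--     """Categorize trials by enrollment size."""
--     buckets = [(e >= 50) + (e >= 200) + (e >= 500) for e in enrollments]
--     return {label: buckets.count(i) for i, label in enumerate(_LABELS)}
-- ===== Notes on version B (the rewrite author's own statement) =====
-- stated objective: alternative
-- what changed: Replaces the if/elif ladder with in-place dict increments by mapping each enrollment to a threshold-count bucket index arithmetically and building the result table by counting each index.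
import Mathlib
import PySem

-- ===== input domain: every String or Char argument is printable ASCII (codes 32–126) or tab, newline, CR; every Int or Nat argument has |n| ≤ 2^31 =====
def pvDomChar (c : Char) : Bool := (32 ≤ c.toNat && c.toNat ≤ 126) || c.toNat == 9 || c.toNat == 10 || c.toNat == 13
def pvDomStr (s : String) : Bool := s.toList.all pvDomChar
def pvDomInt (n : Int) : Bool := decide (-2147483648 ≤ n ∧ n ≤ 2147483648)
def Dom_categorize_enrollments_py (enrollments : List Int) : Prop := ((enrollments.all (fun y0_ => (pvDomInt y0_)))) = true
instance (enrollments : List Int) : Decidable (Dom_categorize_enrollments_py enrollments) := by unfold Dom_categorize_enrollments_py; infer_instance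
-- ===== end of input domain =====

-- B replaces A's if/elif ladder with dict increments by a bucket-index map plus per-index counting (alternative decomposition, same cost).

-- ===== PORT A =====
def categorize_enrollments_py (enrollments : List Int) : List (String × Int) :=
  let categories : PySem.Dict String Int :=
    PySem.Dict.ofList [("small (<50)", 0), ("medium (50-200)", 0), ("large (200-500)", 0), ("very_large (>500)", 0)]
  let categories := enrollments.foldl (fun d e =>
    if e < 50 then d.modify "small (<50)" 0 (· + 1)
    else if e < 200 then d.modify "medium (50-200)" 0 (· + 1)
    else if e < 500 then d.modify "large (200-500)" 0 (· + 1)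
    else d.modify "very_large (>500)" 0 (· + 1)) categories
  categories.items

-- ===== PORT B =====
def pvLabels : List String := ["small (<50)", "medium (50-200)", "large (200-500)", "very_large (>500)"]

def categorize_enrollments_py_alt (enrollments : List Int) : List (String × Int) :=
  let buckets : List Int := enrollments.map (fun e =>
    (if e ≥ 50 then (1 : Int) else 0) + (if e ≥ 200 then 1 else 0) + (if e ≥ 500 then 1 else 0))
  (PySem.List.enumerate pvLabels).map (fun p => (p.2, (buckets.count p.1 : Int)))

-- ===== PRECONDITION & SPEC =====
def Spec_categorize_enrollments_py (enrollments : List Int) (out : List (String × Int)) : Prop := out = categorize_enrollments_py_alt enrollments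
instance (enrollments : List Int) (out : List (String × Int)) : Decidable (Spec_categorize_enrollments_py enrollments out) := by unfold Spec_categorize_enrollments_py; infer_instance

-- ===== CLAIM (what is proved, stated in full; the proofs are below) =====
def Claim_equal_categorize_enrollments_py : Prop := ∀ (enrollments : List Int), Dom_categorize_enrollments_py enrollments → Spec_categorize_enrollments_py enrollments (categorize_enrollments_py enrollments)

-- ===== LEMMAS AND PROOFS =====

-- the label A's loop body increments for a given e
def pvKey (e : Int) : String :=
  if e < 50 then "small (<50)"
  else if e < 200 then "medium (50-200)"
  else if e < 500 then "large (200-500)"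
  else "very_large (>500)"

theorem pvBody_eq : (fun (d : PySem.Dict String Int) (e : Int) =>
    if e < 50 then d.modify "small (<50)" 0 (· + 1)
    else if e < 200 then d.modify "medium (50-200)" 0 (· + 1)
    else if e < 500 then d.modify "large (200-500)" 0 (· + 1)
    else d.modify "very_large (>500)" 0 (· + 1))
    = fun d e => d.modify (pvKey e) 0 (· + 1) := by
  funext d e
  unfold pvKey
  split_ifs <;> rfl

-- per-element: counting label pvKey e = ℓᵢ is counting bucket index i
theorem pvKey_count (enrollments : List Int) (i : Int) (ℓ : String)
    (h : ∀ e : Int, (pvKey e == ℓ) = (((if e ≥ 50 then (1 : Int) else 0) + (if e ≥ 200 then 1 else 0) + (if e ≥ 500 then 1 else 0)) == i)) :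
    (enrollments.map pvKey).count ℓ
      = (enrollments.map (fun e => (if e ≥ 50 then (1 : Int) else 0) + (if e ≥ 200 then 1 else 0) + (if e ≥ 500 then 1 else 0))).count i := by
  simp only [List.count_eq_countP, List.countP_map]
  exact List.countP_congr (fun e _ => by simpa using (h e))

theorem pvKey_eq (e : Int) (ℓ : String) (i : Int)
    (h : (ℓ, i) ∈ [(("small (<50)" : String), (0 : Int)), ("medium (50-200)", 1), ("large (200-500)", 2), ("very_large (>500)", 3)]) :
    (pvKey e == ℓ) = (((if e ≥ 50 then (1 : Int) else 0) + (if e ≥ 200 then 1 else 0) + (if e ≥ 500 then 1 else 0)) == i) := by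
  unfold pvKey
  fin_cases h <;> split_ifs <;> simp_all <;> omega

theorem categorize_enrollments_py_spec : Claim_equal_categorize_enrollments_py := by
  intro enrollments _
  unfold Spec_categorize_enrollments_py categorize_enrollments_py categorize_enrollments_py_alt
  rw [pvBody_eq]
  set d0 : PySem.Dict String Int :=
    PySem.Dict.ofList [("small (<50)", 0), ("medium (50-200)", 0), ("large (200-500)", 0), ("very_large (>500)", 0)] with hd0
  set res := enrollments.foldl (fun d e => PySem.Dict.modify d (pvKey e) 0 (· + 1)) d0 with hres
  have hfold : res = (enrollments.map pvKey).foldl (fun d k => PySem.Dict.modify d k 0 (· + 1)) d0 := by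
    rw [hres, List.foldl_map]
  -- keys are unchanged by the modify loop
  have hmem : ∀ e : Int, pvKey e ∈ d0.keys := by
    intro e; unfold pvKey; split_ifs <;> decide
  have hkeys : res.keys = d0.keys := by
    rw [hfold, PySem.Dict.keys_foldl_modify, PySem.Set.update_eq_append_filter]
    rw [List.filter_eq_nil_iff.mpr, List.append_nil]
    intro y hy
    have : y ∈ enrollments.map pvKey := (PySem.Set.mem_ofList _ _).mp hy
    obtain ⟨e, -, rfl⟩ := List.mem_map.mp this
    simp [PySem.Set.contains, hmem e]
  have hnd : res.keys.Nodup := by rw [hkeys]; decide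
  have hget : ∀ k : String, res.getD k 0 = d0.getD k 0 + (enrollments.map pvKey).count k := by
    intro k; rw [hfold, PySem.Dict.getD_foldl_modify_add_one]
  have hitems : res.items = res.keys.map (fun k => (k, res.getD k 0)) :=
    PySem.Dict.items_eq_map_keys res hnd 0
  rw [hitems, hkeys]
  have hkeys0 : d0.keys = pvLabels := by decide
  rw [hkeys0]
  simp only [pvLabels, List.map, PySem.List.enumerate_cons, PySem.List.enumerate_nil, hget]
  have h0 := pvKey_count enrollments 0 "small (<50)" (fun e => pvKey_eq e _ _ (by decide))
  have h1 := pvKey_count enrollments 1 "medium (50-200)" (fun e => pvKey_eq e _ _ (by decide))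
  have h2 := pvKey_count enrollments 2 "large (200-500)" (fun e => pvKey_eq e _ _ (by decide))
  have h3 := pvKey_count enrollments 3 "very_large (>500)" (fun e => pvKey_eq e _ _ (by decide))
  have g0 : (PySem.Dict.ofList [(("small (<50)" : String), (0 : Int)), ("medium (50-200)", 0), ("large (200-500)", 0), ("very_large (>500)", 0)]).getD "small (<50)" 0 = 0 := by decide
  have g1 : (PySem.Dict.ofList [(("small (<50)" : String), (0 : Int)), ("medium (50-200)", 0), ("large (200-500)", 0), ("very_large (>500)", 0)]).getD "medium (50-200)" 0 = 0 := by decide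
  have g2 : (PySem.Dict.ofList [(("small (<50)" : String), (0 : Int)), ("medium (50-200)", 0), ("large (200-500)", 0), ("very_large (>500)", 0)]).getD "large (200-500)" 0 = 0 := by decide
  have g3 : (PySem.Dict.ofList [(("small (<50)" : String), (0 : Int)), ("medium (50-200)", 0), ("large (200-500)", 0), ("very_large (>500)", 0)]).getD "very_large (>500)" 0 = 0 := by decide
  simp only [h0, h1, h2, h3, hd0, g0, g1, g2, g3]
  norm_num
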